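-- pv_equiv track=rewrite | github.com/geodimitrov/Random | CodeWars/Python/7 kyu/alphabet_war.py | alphabet_war
-- ===== SOURCE A (Python) =====
-- def alphabet_war(fight):
--     l_side_power_pts = {
--         'w': 4, 'p': 3, 'b': 2, 's': 1,
--     }
--     r_side_power_pts = {
--         'm': 4, 'q': 3, 'd': 2, 'z': 1,
--     }
--
--     l_side_total_pts = 0
--     r_side_total_pts = 0
--
--     for char in fight:
--         if char in l_side_power_pts:
--             l_side_total_pts += l_side_power_pts[char]
--         elif char in r_side_power_pts:
--             r_side_total_pts += r_side_power_pts[char]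
--
--     if l_side_total_pts > r_side_total_pts:
--         return 'Left side wins!'
--     elif l_side_total_pts < r_side_total_pts:
--         return 'Right side wins!'
--     else:
--         return 'Let\'s fight again!'
-- ===== SOURCE B (Python) =====
-- def alphabet_war(fight):
--     # Stage 1: build a character histogram of the whole string (no weights yet).
--     counts = {}
--     for ch in fight:
--         counts[ch] = counts.get(ch, 0) + 1
--     # Stage 2: each side's power is a weighted sum over its own 4-letter table.
--     left = sum(w * counts.get(c, 0) for c, w in (('w', 4), ('p', 3), ('b', 2), ('s', 1)))
--     right = sum(w * counts.get(c, 0) for c, w in (('m', 4), ('q', 3), ('d', 2), ('z', 1)))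
--     if left > right:
--         return 'Left side wins!'
--     if right > left:
--         return 'Right side wins!'
--     return "Let's fight again!"
-- ===== Notes on version B (the rewrite author's own statement) =====
-- stated objective: alternative
-- what changed: B replaces A's single weighted pass (per-character branch chain adding into two running totals) by a two-stage algorithm: it first builds an unweighted character histogram of the string, then computes each side's power as a weighted sum over that side's 4-entry letter table, so the weights are applied letter-by-letter to counts rather than character-by-character to the stream.
import Mathlib
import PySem

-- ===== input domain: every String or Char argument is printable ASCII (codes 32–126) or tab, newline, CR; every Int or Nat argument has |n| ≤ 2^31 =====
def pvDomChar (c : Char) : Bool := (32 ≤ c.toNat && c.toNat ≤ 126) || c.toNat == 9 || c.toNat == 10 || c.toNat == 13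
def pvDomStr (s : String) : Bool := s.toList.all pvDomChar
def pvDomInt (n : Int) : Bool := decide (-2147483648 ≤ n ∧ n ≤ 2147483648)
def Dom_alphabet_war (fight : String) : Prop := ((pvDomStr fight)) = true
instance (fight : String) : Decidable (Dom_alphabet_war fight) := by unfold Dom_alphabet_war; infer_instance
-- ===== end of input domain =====

-- B builds an unweighted character histogram of the string first, then computes each side's
-- power as a weighted sum over that side's 4-letter table, instead of A's single weighted
-- per-character pass with a branch chain and two running totals (objective: alternative).

-- ===== PORT A =====
def pvA_lside : PySem.Dict Char Int :=
  PySem.Dict.ofList [('w', 4), ('p', 3), ('b', 2), ('s', 1)]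
def pvA_rside : PySem.Dict Char Int :=
  PySem.Dict.ofList [('m', 4), ('q', 3), ('d', 2), ('z', 1)]

def pvA_step (acc : Int × Int) (c : Char) : Int × Int :=
  if pvA_lside.contains c then (acc.1 + pvA_lside.getD c 0, acc.2)
  else if pvA_rside.contains c then (acc.1, acc.2 + pvA_rside.getD c 0)
  else acc

def alphabet_war (fight : String) : String :=
  let totals := fight.toList.foldl pvA_step ((0 : Int), (0 : Int))
  if totals.1 > totals.2 then "Left side wins!"
  else if totals.1 < totals.2 then "Right side wins!"
  else "Let's fight again!"

-- ===== PORT B =====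
def pvB_ltable : List (Char × Int) := [('w', 4), ('p', 3), ('b', 2), ('s', 1)]
def pvB_rtable : List (Char × Int) := [('m', 4), ('q', 3), ('d', 2), ('z', 1)]

def alphabet_war_alt (fight : String) : String :=
  -- stage 1: histogram  counts[ch] = counts.get(ch, 0) + 1
  let counts :=
    fight.toList.foldl (fun d c => d.insert c (d.getD c 0 + 1)) (PySem.Dict.mk ([] : List (Char × Int)))
  -- stage 2: weighted sums over the two letter tables
  let left := (pvB_ltable.map (fun p => p.2 * counts.getD p.1 0)).sum
  let right := (pvB_rtable.map (fun p => p.2 * counts.getD p.1 0)).sum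
  if left > right then "Left side wins!"
  else if right > left then "Right side wins!"
  else "Let's fight again!"

-- ===== PRECONDITION & SPEC =====
def Spec_alphabet_war (fight : String) (out : String) : Prop := out = alphabet_war_alt fight
instance (fight : String) (out : String) : Decidable (Spec_alphabet_war fight out) := by unfold Spec_alphabet_war; infer_instance

-- ===== CLAIM =====
def Claim_equal_alphabet_war : Prop := ∀ (fight : String), Dom_alphabet_war fight → Spec_alphabet_war fight (alphabet_war fight)

-- ===== LEMMAS AND PROOFS =====

theorem pv_lside_mk : pvA_lside = PySem.Dict.mk [('w', 4), ('p', 3), ('b', 2), ('s', 1)] := by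
  decide
theorem pv_rside_mk : pvA_rside = PySem.Dict.mk [('m', 4), ('q', 3), ('d', 2), ('z', 1)] := by
  decide

-- A's step leaves the accumulator unchanged on a character of neither side
theorem pv_step_other (a b : Int) (c : Char)
    (hw : c ≠ 'w') (hp : c ≠ 'p') (hb : c ≠ 'b') (hs : c ≠ 's')
    (hm : c ≠ 'm') (hq : c ≠ 'q') (hd : c ≠ 'd') (hz : c ≠ 'z') :
    pvA_step (a, b) c = (a, b) := by
  have h1 : pvA_lside.contains c = false := by
    rw [pv_lside_mk]; simp [PySem.Dict.contains_mk]
    exact ⟨Ne.symm hw, Ne.symm hp, Ne.symm hb, Ne.symm hs⟩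
  have h2 : pvA_rside.contains c = false := by
    rw [pv_rside_mk]; simp [PySem.Dict.contains_mk]
    exact ⟨Ne.symm hm, Ne.symm hq, Ne.symm hd, Ne.symm hz⟩
  simp [pvA_step, h1, h2]

-- A's fold computes the weighted letter counts of the string
theorem pv_fold (cs : List Char) (a b : Int) :
    cs.foldl pvA_step (a, b)
      = (a + 4 * cs.count 'w' + 3 * cs.count 'p' + 2 * cs.count 'b' + cs.count 's',
         b + 4 * cs.count 'm' + 3 * cs.count 'q' + 2 * cs.count 'd' + cs.count 'z') := by
  induction cs generalizing a b with
  | nil => simp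
  | cons c cs ih =>
    simp only [List.foldl_cons]
    by_cases hw : c = 'w'
    · subst hw; rw [show pvA_step (a, b) 'w' = (a + 4, b) from rfl, ih]
      simp; ring
    · by_cases hp : c = 'p'
      · subst hp; rw [show pvA_step (a, b) 'p' = (a + 3, b) from rfl, ih]
        simp; ring
      · by_cases hb : c = 'b'
        · subst hb; rw [show pvA_step (a, b) 'b' = (a + 2, b) from rfl, ih]
          simp; ring
        · by_cases hs : c = 's'
          · subst hs; rw [show pvA_step (a, b) 's' = (a + 1, b) from rfl, ih]
            simp; ring
          · by_cases hm : c = 'm'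
            · subst hm; rw [show pvA_step (a, b) 'm' = (a, b + 4) from rfl, ih]
              simp; ring
            · by_cases hq : c = 'q'
              · subst hq; rw [show pvA_step (a, b) 'q' = (a, b + 3) from rfl, ih]
                simp; ring
              · by_cases hd : c = 'd'
                · subst hd; rw [show pvA_step (a, b) 'd' = (a, b + 2) from rfl, ih]
                  simp; ring
                · by_cases hz : c = 'z'
                  · subst hz; rw [show pvA_step (a, b) 'z' = (a, b + 1) from rfl, ih]
                    simp; ring
                  · rw [pv_step_other a b c hw hp hb hs hm hq hd hz, ih]
                    simp [hw, hp, hb, hs, hm, hq, hd, hz]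

-- B's histogram looks up to the letter count of the string
theorem pv_hist (cs : List Char) (c : Char) :
    (cs.foldl (fun d c => d.insert c (d.getD c 0 + 1)) (PySem.Dict.mk ([] : List (Char × Int)))).getD c 0
      = (cs.count c : Int) := by
  rw [PySem.Dict.getD_foldl_insert_add_one]
  simp [PySem.Dict.getD, PySem.Dict.get?]

-- ===== VERDICT =====
theorem alphabet_war_spec : Claim_equal_alphabet_war := by
  intro fight _
  unfold Spec_alphabet_war alphabet_war alphabet_war_alt
  rw [pv_fold fight.toList 0 0]
  simp only [pvB_ltable, pvB_rtable, List.map_cons, List.map_nil, List.sum_cons,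
    List.sum_nil, pv_hist]
  split_ifs <;> first | rfl | omega
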